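-- pv_equiv track=rewrite | github.com/phoenixsenses/eclipse_scalper | execution/reliability_gate_runtime.py | _categorize_mismatch_ids
-- ===== SOURCE A (Python) =====
-- from typing import Any, Dict
--
-- def _categorize_mismatch_ids(ids: list[str]) -> Dict[str, int]:
--     categories: Dict[str, int] = {
--         "ledger": 0,
--         "transition": 0,
--         "belief": 0,
--         "position": 0,
--         "orphan": 0,
--         "coverage_gap": 0,
--         "stage1_protection_fail": 0,
--         "replace_race": 0,
--         "contradiction": 0,
--         "unknown": 0,
--     }
--     for raw in ids:
--         cid = str(raw or "").strip().lower()
--         if not cid: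
--             continue
--         if cid.startswith("led-") or "ledger" in cid:
--             categories["ledger"] = int(categories.get("ledger", 0)) + 1
--         elif cid.startswith("trn-") or "transition" in cid:
--             categories["transition"] = int(categories.get("transition", 0)) + 1
--         elif cid.startswith("blf-") or "belief" in cid:
--             categories["belief"] = int(categories.get("belief", 0)) + 1
--         elif cid.startswith("pos-") or "position" in cid:
--             categories["position"] = int(categories.get("position", 0)) + 1
--         elif "orphan" in cid:
--             categories["orphan"] = int(categories.get("orphan", 0)) + 1
--         elif "coverage" in cid or "protect" in cid:
--             categories["coverage_gap"] = int(categories.get("coverage_gap", 0)) + 1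
--         elif "replace" in cid:
--             categories["replace_race"] = int(categories.get("replace_race", 0)) + 1
--         elif "contrad" in cid:
--             categories["contradiction"] = int(categories.get("contradiction", 0)) + 1
--         else:
--             categories["unknown"] = int(categories.get("unknown", 0)) + 1
--     return categories
-- ===== SOURCE B (Python) =====
-- from typing import Dict
--
-- # Ordered rules; the pipeline peels matches off category by category.
-- _RULES = [
--     ("ledger", lambda c: c.startswith("led-") or "ledger" in c),
--     ("transition", lambda c: c.startswith("trn-") or "transition" in c),
--     ("belief", lambda c: c.startswith("blf-") or "belief" in c),
--     ("position", lambda c: c.startswith("pos-") or "position" in c),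
--     ("orphan", lambda c: "orphan" in c),
--     ("coverage_gap", lambda c: "coverage" in c or "protect" in c),
--     ("replace_race", lambda c: "replace" in c),
--     ("contradiction", lambda c: "contrad" in c),
-- ]
--
-- _KEYS = ("ledger", "transition", "belief", "position", "orphan",
--          "coverage_gap", "stage1_protection_fail", "replace_race",
--          "contradiction", "unknown")
--
--
-- def _categorize_mismatch_ids(ids: list[str]) -> Dict[str, int]:
--     counts: Dict[str, int] = {k: 0 for k in _KEYS}
--     # stage 0: normalise once, dropping empties
--     remaining = [c for c in (str(raw or "").strip().lower() for raw in ids) if c]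
--     # stages 1..8: each category claims its ids and removes them from the pool,
--     # so later categories only ever see ids no earlier category matched
--     for name, pred in _RULES:
--         matched, rest = [], []
--         for c in remaining:
--             (matched if pred(c) else rest).append(c)
--         counts[name] = len(matched)
--         remaining = rest
--     counts["unknown"] = len(remaining)
--     return counts
-- ===== Notes on version B (the rewrite author's own statement) =====
-- stated objective: alternative
-- what changed: Replaces A's per-id first-match if/elif cascade with a category-major partition pipeline: ids are normalised once into a pool, then each category in priority order partitions the pool, counts its matches and passes only the unmatched rest to the next category, with 'unknown' as the leftover pool.
import Mathlib
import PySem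

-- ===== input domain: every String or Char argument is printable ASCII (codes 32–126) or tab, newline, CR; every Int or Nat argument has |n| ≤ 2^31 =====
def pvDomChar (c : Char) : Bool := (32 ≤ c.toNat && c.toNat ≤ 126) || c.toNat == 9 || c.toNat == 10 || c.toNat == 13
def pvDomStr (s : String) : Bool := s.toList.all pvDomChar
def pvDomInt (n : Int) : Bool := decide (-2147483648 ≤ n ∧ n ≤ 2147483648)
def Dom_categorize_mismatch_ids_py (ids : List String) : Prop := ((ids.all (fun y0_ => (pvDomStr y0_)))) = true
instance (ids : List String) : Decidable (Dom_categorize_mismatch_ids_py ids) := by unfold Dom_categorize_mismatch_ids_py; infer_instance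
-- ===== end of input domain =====

-- B replaces A's per-id if/elif cascade with a category-major partition pipeline over a shrinking pool; alternative decomposition, same cost.

-- ===== PORT A =====
-- the ten-key zero dict, in A's insertion order
def pvInitCats : PySem.Dict String Int :=
  PySem.Dict.ofList [("ledger", 0), ("transition", 0), ("belief", 0), ("position", 0),
    ("orphan", 0), ("coverage_gap", 0), ("stage1_protection_fail", 0), ("replace_race", 0),
    ("contradiction", 0), ("unknown", 0)]

-- one iteration of A's loop body (the if/elif cascade); 'raw or ""' is raw itself for a str
def pvStepA (d : PySem.Dict String Int) (raw : String) : PySem.Dict String Int :=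
  let cid := PySem.Str.lower (PySem.Str.strip raw)
  if cid = "" then d
  else if PySem.Str.startswith cid "led-" || PySem.Str.isIn "ledger" cid then
    d.insert "ledger" (d.getD "ledger" 0 + 1)
  else if PySem.Str.startswith cid "trn-" || PySem.Str.isIn "transition" cid then
    d.insert "transition" (d.getD "transition" 0 + 1)
  else if PySem.Str.startswith cid "blf-" || PySem.Str.isIn "belief" cid then
    d.insert "belief" (d.getD "belief" 0 + 1)
  else if PySem.Str.startswith cid "pos-" || PySem.Str.isIn "position" cid then
    d.insert "position" (d.getD "position" 0 + 1)
  else if PySem.Str.isIn "orphan" cid then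
    d.insert "orphan" (d.getD "orphan" 0 + 1)
  else if PySem.Str.isIn "coverage" cid || PySem.Str.isIn "protect" cid then
    d.insert "coverage_gap" (d.getD "coverage_gap" 0 + 1)
  else if PySem.Str.isIn "replace" cid then
    d.insert "replace_race" (d.getD "replace_race" 0 + 1)
  else if PySem.Str.isIn "contrad" cid then
    d.insert "contradiction" (d.getD "contradiction" 0 + 1)
  else
    d.insert "unknown" (d.getD "unknown" 0 + 1)

def categorize_mismatch_ids_py (ids : List String) : List (String × Int) :=
  (ids.foldl pvStepA pvInitCats).items

-- ===== PORT B =====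
-- the ordered rule table _RULES of Source B
def pvRulesB : List (String × (String → Bool)) :=
  [ ("ledger", fun c => PySem.Str.startswith c "led-" || PySem.Str.isIn "ledger" c),
    ("transition", fun c => PySem.Str.startswith c "trn-" || PySem.Str.isIn "transition" c),
    ("belief", fun c => PySem.Str.startswith c "blf-" || PySem.Str.isIn "belief" c),
    ("position", fun c => PySem.Str.startswith c "pos-" || PySem.Str.isIn "position" c),
    ("orphan", fun c => PySem.Str.isIn "orphan" c),
    ("coverage_gap", fun c => PySem.Str.isIn "coverage" c || PySem.Str.isIn "protect" c),
    ("replace_race", fun c => PySem.Str.isIn "replace" c),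
    ("contradiction", fun c => PySem.Str.isIn "contrad" c) ]

-- for name, pred in _RULES: partition the pool, record the match count, keep the rest;
-- after the loop, counts["unknown"] = len(remaining)
def pvPipe (d : PySem.Dict String Int) : List (String × (String → Bool)) → List String → PySem.Dict String Int
  | [], remaining => d.insert "unknown" (remaining.length : Int)
  | (name, pred) :: rs, remaining =>
      let parts := remaining.partition pred
      pvPipe (d.insert name (parts.1.length : Int)) rs parts.2

def categorize_mismatch_ids_py_alt (ids : List String) : List (String × Int) :=
  -- stage 0: normalise once, dropping empties; then the staged category passes
  (pvPipe pvInitCats pvRulesB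
    ((ids.map (fun raw => PySem.Str.lower (PySem.Str.strip raw))).filter (fun c => c ≠ ""))).items

-- ===== PRECONDITION & SPEC =====
def Spec_categorize_mismatch_ids_py (ids : List String) (out : List (String × Int)) : Prop := out = categorize_mismatch_ids_py_alt ids
instance (ids : List String) (out : List (String × Int)) : Decidable (Spec_categorize_mismatch_ids_py ids out) := by unfold Spec_categorize_mismatch_ids_py; infer_instance

-- ===== CLAIM (what is proved, stated in full; the proofs are below) =====
def Claim_equal_categorize_mismatch_ids_py : Prop := ∀ (ids : List String), Dom_categorize_mismatch_ids_py ids → Spec_categorize_mismatch_ids_py ids (categorize_mismatch_ids_py ids)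

-- ===== LEMMAS AND PROOFS =====

-- the ten-key dict with explicit values, A's key order
def pvMkD (v1 v2 v3 v4 v5 v6 v7 v8 v9 v10 : Int) : PySem.Dict String Int :=
  PySem.Dict.mk [("ledger", v1), ("transition", v2), ("belief", v3), ("position", v4),
    ("orphan", v5), ("coverage_gap", v6), ("stage1_protection_fail", v7), ("replace_race", v8),
    ("contradiction", v9), ("unknown", v10)]

theorem pvInit_eq : pvInitCats = pvMkD 0 0 0 0 0 0 0 0 0 0 := by decide

theorem pvIns1 (v1 v2 v3 v4 v5 v6 v7 v8 v9 v10 w : Int) :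
    (pvMkD v1 v2 v3 v4 v5 v6 v7 v8 v9 v10).insert "ledger" w = pvMkD w v2 v3 v4 v5 v6 v7 v8 v9 v10 := rfl
theorem pvGet1 (v1 v2 v3 v4 v5 v6 v7 v8 v9 v10 : Int) :
    (pvMkD v1 v2 v3 v4 v5 v6 v7 v8 v9 v10).getD "ledger" 0 = v1 := rfl
theorem pvIns2 (v1 v2 v3 v4 v5 v6 v7 v8 v9 v10 w : Int) :
    (pvMkD v1 v2 v3 v4 v5 v6 v7 v8 v9 v10).insert "transition" w = pvMkD v1 w v3 v4 v5 v6 v7 v8 v9 v10 := rfl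
theorem pvGet2 (v1 v2 v3 v4 v5 v6 v7 v8 v9 v10 : Int) :
    (pvMkD v1 v2 v3 v4 v5 v6 v7 v8 v9 v10).getD "transition" 0 = v2 := rfl
theorem pvIns3 (v1 v2 v3 v4 v5 v6 v7 v8 v9 v10 w : Int) :
    (pvMkD v1 v2 v3 v4 v5 v6 v7 v8 v9 v10).insert "belief" w = pvMkD v1 v2 w v4 v5 v6 v7 v8 v9 v10 := rfl
theorem pvGet3 (v1 v2 v3 v4 v5 v6 v7 v8 v9 v10 : Int) :
    (pvMkD v1 v2 v3 v4 v5 v6 v7 v8 v9 v10).getD "belief" 0 = v3 := rfl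
theorem pvIns4 (v1 v2 v3 v4 v5 v6 v7 v8 v9 v10 w : Int) :
    (pvMkD v1 v2 v3 v4 v5 v6 v7 v8 v9 v10).insert "position" w = pvMkD v1 v2 v3 w v5 v6 v7 v8 v9 v10 := rfl
theorem pvGet4 (v1 v2 v3 v4 v5 v6 v7 v8 v9 v10 : Int) :
    (pvMkD v1 v2 v3 v4 v5 v6 v7 v8 v9 v10).getD "position" 0 = v4 := rfl
theorem pvIns5 (v1 v2 v3 v4 v5 v6 v7 v8 v9 v10 w : Int) :
    (pvMkD v1 v2 v3 v4 v5 v6 v7 v8 v9 v10).insert "orphan" w = pvMkD v1 v2 v3 v4 w v6 v7 v8 v9 v10 := rfl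
theorem pvGet5 (v1 v2 v3 v4 v5 v6 v7 v8 v9 v10 : Int) :
    (pvMkD v1 v2 v3 v4 v5 v6 v7 v8 v9 v10).getD "orphan" 0 = v5 := rfl
theorem pvIns6 (v1 v2 v3 v4 v5 v6 v7 v8 v9 v10 w : Int) :
    (pvMkD v1 v2 v3 v4 v5 v6 v7 v8 v9 v10).insert "coverage_gap" w = pvMkD v1 v2 v3 v4 v5 w v7 v8 v9 v10 := rfl
theorem pvGet6 (v1 v2 v3 v4 v5 v6 v7 v8 v9 v10 : Int) :
    (pvMkD v1 v2 v3 v4 v5 v6 v7 v8 v9 v10).getD "coverage_gap" 0 = v6 := rfl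
theorem pvIns8 (v1 v2 v3 v4 v5 v6 v7 v8 v9 v10 w : Int) :
    (pvMkD v1 v2 v3 v4 v5 v6 v7 v8 v9 v10).insert "replace_race" w = pvMkD v1 v2 v3 v4 v5 v6 v7 w v9 v10 := rfl
theorem pvGet8 (v1 v2 v3 v4 v5 v6 v7 v8 v9 v10 : Int) :
    (pvMkD v1 v2 v3 v4 v5 v6 v7 v8 v9 v10).getD "replace_race" 0 = v8 := rfl
theorem pvIns9 (v1 v2 v3 v4 v5 v6 v7 v8 v9 v10 w : Int) :
    (pvMkD v1 v2 v3 v4 v5 v6 v7 v8 v9 v10).insert "contradiction" w = pvMkD v1 v2 v3 v4 v5 v6 v7 v8 w v10 := rfl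
theorem pvGet9 (v1 v2 v3 v4 v5 v6 v7 v8 v9 v10 : Int) :
    (pvMkD v1 v2 v3 v4 v5 v6 v7 v8 v9 v10).getD "contradiction" 0 = v9 := rfl
theorem pvIns10 (v1 v2 v3 v4 v5 v6 v7 v8 v9 v10 w : Int) :
    (pvMkD v1 v2 v3 v4 v5 v6 v7 v8 v9 v10).insert "unknown" w = pvMkD v1 v2 v3 v4 v5 v6 v7 v8 v9 w := rfl
theorem pvGet10 (v1 v2 v3 v4 v5 v6 v7 v8 v9 v10 : Int) :
    (pvMkD v1 v2 v3 v4 v5 v6 v7 v8 v9 v10).getD "unknown" 0 = v10 := rfl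

-- branch predicates of the cascade
def pvP1 (c : String) : Bool := PySem.Str.startswith c "led-" || PySem.Str.isIn "ledger" c
def pvP2 (c : String) : Bool := PySem.Str.startswith c "trn-" || PySem.Str.isIn "transition" c
def pvP3 (c : String) : Bool := PySem.Str.startswith c "blf-" || PySem.Str.isIn "belief" c
def pvP4 (c : String) : Bool := PySem.Str.startswith c "pos-" || PySem.Str.isIn "position" c
def pvP5 (c : String) : Bool := PySem.Str.isIn "orphan" c
def pvP6 (c : String) : Bool := PySem.Str.isIn "coverage" c || PySem.Str.isIn "protect" c
def pvP7 (c : String) : Bool := PySem.Str.isIn "replace" c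
def pvP8 (c : String) : Bool := PySem.Str.isIn "contrad" c

-- first-match predicate of each category (its branch holds, all earlier ones fail)
def pvQ1 (c : String) : Bool := pvP1 c
def pvQ2 (c : String) : Bool := pvP2 c && !pvP1 c
def pvQ3 (c : String) : Bool := pvP3 c && (!pvP2 c && !pvP1 c)
def pvQ4 (c : String) : Bool := pvP4 c && (!pvP3 c && (!pvP2 c && !pvP1 c))
def pvQ5 (c : String) : Bool := pvP5 c && (!pvP4 c && (!pvP3 c && (!pvP2 c && !pvP1 c)))
def pvQ6 (c : String) : Bool := pvP6 c && (!pvP5 c && (!pvP4 c && (!pvP3 c && (!pvP2 c && !pvP1 c))))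
def pvQ7 (c : String) : Bool := pvP7 c && (!pvP6 c && (!pvP5 c && (!pvP4 c && (!pvP3 c && (!pvP2 c && !pvP1 c)))))
def pvQ8 (c : String) : Bool := pvP8 c && (!pvP7 c && (!pvP6 c && (!pvP5 c && (!pvP4 c && (!pvP3 c && (!pvP2 c && !pvP1 c))))))
def pvQU (c : String) : Bool := !pvP8 c && (!pvP7 c && (!pvP6 c && (!pvP5 c && (!pvP4 c && (!pvP3 c && (!pvP2 c && !pvP1 c))))))

def pvCids (ids : List String) : List String :=
  (ids.map (fun raw => PySem.Str.lower (PySem.Str.strip raw))).filter (fun c => c ≠ "")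

theorem pvFoldA (ids : List String) (v1 v2 v3 v4 v5 v6 v7 v8 v9 v10 : Int) :
    ids.foldl pvStepA (pvMkD v1 v2 v3 v4 v5 v6 v7 v8 v9 v10) =
      pvMkD (v1 + ((pvCids ids).countP pvQ1 : Int)) (v2 + ((pvCids ids).countP pvQ2 : Int))
        (v3 + ((pvCids ids).countP pvQ3 : Int)) (v4 + ((pvCids ids).countP pvQ4 : Int))
        (v5 + ((pvCids ids).countP pvQ5 : Int)) (v6 + ((pvCids ids).countP pvQ6 : Int))
        v7 (v8 + ((pvCids ids).countP pvQ7 : Int))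
        (v9 + ((pvCids ids).countP pvQ8 : Int)) (v10 + ((pvCids ids).countP pvQU : Int)) := by
  induction ids generalizing v1 v2 v3 v4 v5 v6 v7 v8 v9 v10 with
  | nil => simp [pvCids]
  | cons raw ids IH =>
    by_cases hc : PySem.Str.lower (PySem.Str.strip raw) = ""
    · have h0 : pvStepA (pvMkD v1 v2 v3 v4 v5 v6 v7 v8 v9 v10) raw = pvMkD v1 v2 v3 v4 v5 v6 v7 v8 v9 v10 := by
        simp [pvStepA, hc]
      have hcid : pvCids (raw :: ids) = pvCids ids := by simp [pvCids, hc]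
      simp only [List.foldl_cons, h0, hcid, IH]
    · have hcid : pvCids (raw :: ids) = PySem.Str.lower (PySem.Str.strip raw) :: pvCids ids := by
        simp [pvCids, hc]
      simp only [List.foldl_cons, pvStepA, hcid]
      rw [if_neg hc]
      by_cases h1 : (PySem.Str.startswith (PySem.Str.lower (PySem.Str.strip raw)) "led-" || PySem.Str.isIn "ledger" (PySem.Str.lower (PySem.Str.strip raw))) = true
      · rw [if_pos h1]
        rw [pvGet1, pvIns1, IH]
        simp only [List.countP_cons, pvQ1, pvQ2, pvQ3, pvQ4, pvQ5, pvQ6, pvQ7, pvQ8, pvQU, pvP1, pvP2, pvP3, pvP4, pvP5, pvP6, pvP7, pvP8, h1, Bool.not_true, Bool.and_false, if_true]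
        simp only [pvMkD, PySem.Dict.mk.injEq, List.cons.injEq, Prod.mk.injEq, and_true, true_and]
        push_cast
        omega
      · rw [if_neg h1]
        by_cases h2 : (PySem.Str.startswith (PySem.Str.lower (PySem.Str.strip raw)) "trn-" || PySem.Str.isIn "transition" (PySem.Str.lower (PySem.Str.strip raw))) = true
        · rw [if_pos h2]
          simp only [Bool.not_eq_true] at h1
          rw [pvGet2, pvIns2, IH]
          simp only [List.countP_cons, pvQ1, pvQ2, pvQ3, pvQ4, pvQ5, pvQ6, pvQ7, pvQ8, pvQU, pvP1, pvP2, pvP3, pvP4, pvP5, pvP6, pvP7, pvP8, h1, h2, Bool.not_true, Bool.not_false, Bool.and_false, Bool.and_true, if_true]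
          simp only [pvMkD, PySem.Dict.mk.injEq, List.cons.injEq, Prod.mk.injEq, and_true, true_and]
          push_cast
          omega
        · rw [if_neg h2]
          by_cases h3 : (PySem.Str.startswith (PySem.Str.lower (PySem.Str.strip raw)) "blf-" || PySem.Str.isIn "belief" (PySem.Str.lower (PySem.Str.strip raw))) = true
          · rw [if_pos h3]
            simp only [Bool.not_eq_true] at h1 h2
            rw [pvGet3, pvIns3, IH]
            simp only [List.countP_cons, pvQ1, pvQ2, pvQ3, pvQ4, pvQ5, pvQ6, pvQ7, pvQ8, pvQU, pvP1, pvP2, pvP3, pvP4, pvP5, pvP6, pvP7, pvP8, h1, h2, h3, Bool.not_true, Bool.not_false, Bool.and_false, Bool.and_true, if_true]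
            simp only [pvMkD, PySem.Dict.mk.injEq, List.cons.injEq, Prod.mk.injEq, and_true, true_and]
            push_cast
            omega
          · rw [if_neg h3]
            by_cases h4 : (PySem.Str.startswith (PySem.Str.lower (PySem.Str.strip raw)) "pos-" || PySem.Str.isIn "position" (PySem.Str.lower (PySem.Str.strip raw))) = true
            · rw [if_pos h4]
              simp only [Bool.not_eq_true] at h1 h2 h3
              rw [pvGet4, pvIns4, IH]
              simp only [List.countP_cons, pvQ1, pvQ2, pvQ3, pvQ4, pvQ5, pvQ6, pvQ7, pvQ8, pvQU, pvP1, pvP2, pvP3, pvP4, pvP5, pvP6, pvP7, pvP8, h1, h2, h3, h4, Bool.not_true, Bool.not_false, Bool.and_false, Bool.and_true, if_true]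
              simp only [pvMkD, PySem.Dict.mk.injEq, List.cons.injEq, Prod.mk.injEq, and_true, true_and]
              push_cast
              omega
            · rw [if_neg h4]
              by_cases h5 : (PySem.Str.isIn "orphan" (PySem.Str.lower (PySem.Str.strip raw))) = true
              · rw [if_pos h5]
                simp only [Bool.not_eq_true] at h1 h2 h3 h4
                rw [pvGet5, pvIns5, IH]
                simp only [List.countP_cons, pvQ1, pvQ2, pvQ3, pvQ4, pvQ5, pvQ6, pvQ7, pvQ8, pvQU, pvP1, pvP2, pvP3, pvP4, pvP5, pvP6, pvP7, pvP8, h1, h2, h3, h4, h5, Bool.not_true, Bool.not_false, Bool.and_false, Bool.and_true, if_true]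
                simp only [pvMkD, PySem.Dict.mk.injEq, List.cons.injEq, Prod.mk.injEq, and_true, true_and]
                push_cast
                omega
              · rw [if_neg h5]
                by_cases h6 : (PySem.Str.isIn "coverage" (PySem.Str.lower (PySem.Str.strip raw)) || PySem.Str.isIn "protect" (PySem.Str.lower (PySem.Str.strip raw))) = true
                · rw [if_pos h6]
                  simp only [Bool.not_eq_true] at h1 h2 h3 h4 h5
                  rw [pvGet6, pvIns6, IH]
                  simp only [List.countP_cons, pvQ1, pvQ2, pvQ3, pvQ4, pvQ5, pvQ6, pvQ7, pvQ8, pvQU, pvP1, pvP2, pvP3, pvP4, pvP5, pvP6, pvP7, pvP8, h1, h2, h3, h4, h5, h6, Bool.not_true, Bool.not_false, Bool.and_false, Bool.and_true, if_true]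
                  simp only [pvMkD, PySem.Dict.mk.injEq, List.cons.injEq, Prod.mk.injEq, and_true, true_and]
                  push_cast
                  omega
                · rw [if_neg h6]
                  by_cases h7 : (PySem.Str.isIn "replace" (PySem.Str.lower (PySem.Str.strip raw))) = true
                  · rw [if_pos h7]
                    simp only [Bool.not_eq_true] at h1 h2 h3 h4 h5 h6
                    rw [pvGet8, pvIns8, IH]
                    simp only [List.countP_cons, pvQ1, pvQ2, pvQ3, pvQ4, pvQ5, pvQ6, pvQ7, pvQ8, pvQU, pvP1, pvP2, pvP3, pvP4, pvP5, pvP6, pvP7, pvP8, h1, h2, h3, h4, h5, h6, h7, Bool.not_true, Bool.not_false, Bool.and_false, Bool.and_true, if_true]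
                    simp only [pvMkD, PySem.Dict.mk.injEq, List.cons.injEq, Prod.mk.injEq, and_true, true_and]
                    push_cast
                    omega
                  · rw [if_neg h7]
                    by_cases h8 : (PySem.Str.isIn "contrad" (PySem.Str.lower (PySem.Str.strip raw))) = true
                    · rw [if_pos h8]
                      simp only [Bool.not_eq_true] at h1 h2 h3 h4 h5 h6 h7
                      rw [pvGet9, pvIns9, IH]
                      simp only [List.countP_cons, pvQ1, pvQ2, pvQ3, pvQ4, pvQ5, pvQ6, pvQ7, pvQ8, pvQU, pvP1, pvP2, pvP3, pvP4, pvP5, pvP6, pvP7, pvP8, h1, h2, h3, h4, h5, h6, h7, h8, Bool.not_true, Bool.not_false, Bool.and_true, if_true]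
                      simp only [pvMkD, PySem.Dict.mk.injEq, List.cons.injEq, Prod.mk.injEq, and_true, true_and]
                      push_cast
                      omega
                    · rw [if_neg h8]
                      simp only [Bool.not_eq_true] at h1 h2 h3 h4 h5 h6 h7 h8
                      rw [pvGet10, pvIns10, IH]
                      simp only [List.countP_cons, pvQ1, pvQ2, pvQ3, pvQ4, pvQ5, pvQ6, pvQ7, pvQ8, pvQU, pvP1, pvP2, pvP3, pvP4, pvP5, pvP6, pvP7, pvP8, h1, h2, h3, h4, h5, h6, h7, h8, Bool.not_false, Bool.and_true, if_true]
                      simp only [pvMkD, PySem.Dict.mk.injEq, List.cons.injEq, Prod.mk.injEq, and_true, true_and]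
                      push_cast
                      omega
theorem pvPipeB (rem : List String) :
    pvPipe (pvMkD 0 0 0 0 0 0 0 0 0 0) pvRulesB rem =
      pvMkD (rem.countP pvQ1 : Int) (rem.countP pvQ2 : Int) (rem.countP pvQ3 : Int)
        (rem.countP pvQ4 : Int) (rem.countP pvQ5 : Int) (rem.countP pvQ6 : Int) 0
        (rem.countP pvQ7 : Int) (rem.countP pvQ8 : Int) (rem.countP pvQU : Int) := by
  simp only [pvRulesB, pvPipe, List.partition_eq_filter_filter,
    pvIns1, pvIns2, pvIns3, pvIns4, pvIns5, pvIns6, pvIns8, pvIns9, pvIns10,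
    List.filter_filter, ← List.countP_eq_length_filter]
  rfl

theorem pvFinal (ids : List String) : categorize_mismatch_ids_py ids = categorize_mismatch_ids_py_alt ids := by
  unfold categorize_mismatch_ids_py categorize_mismatch_ids_py_alt
  rw [pvInit_eq, pvFoldA, pvPipeB]
  simp [pvCids]

-- ===== VERDICT (by name: the statement is the Claim_ definition above) =====
theorem categorize_mismatch_ids_py_spec : Claim_equal_categorize_mismatch_ids_py := by
  intro ids _
  exact pvFinal ids
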